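-- pv_equiv track=rewrite | github.com/megusto0/glucotracker | backend/glucotracker/api/routers/autocomplete.py | _text_match_rank
-- ===== SOURCE A (Python) =====
-- def _normalized(value: str | None) -> str:
--     """Return a casefolded search value."""
--     return (value or "").casefold().strip()
--
-- def _text_match_rank(values: list[str], q: str) -> int:
--     """Rank text matches for mixed autocomplete sorting."""
--     query = _normalized(q)
--     if not query:
--         return 3
--     normalized_values = [_normalized(value) for value in values if value]
--     if any(value == query for value in normalized_values):
--         return 0
--     if any(value.startswith(query) for value in normalized_values):
--         return 1
--     if any(query in value for value in normalized_values):
--         return 5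
--     return 9
-- ===== SOURCE B (Python) =====
-- def _normalized(value):
--     """Return a casefolded search value."""
--     return (value or "").casefold().strip()
--
--
-- def _text_match_rank(values, q):
--     """Rank text matches in a single pass keeping the minimum rank."""
--     query = _normalized(q)
--     if not query:
--         return 3
--     best = 9
--     for value in values:
--         if not value:
--             continue
--         v = _normalized(value)
--         if v == query:
--             r = 0
--         elif v.startswith(query):
--             r = 1
--         elif query in v:
--             r = 5
--         else:
--             r = 9
--         if r < best:
--             best = r
--     return best
-- ===== Notes on version B (the rewrite author's own statement) =====
-- stated objective: alternative
-- what changed: Replaces A's three sequential any()-scans over a materialized normalized list with one pass over the raw values that normalizes each and keeps the minimum rank (0/1/5/9 via an elif chain).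
import Mathlib
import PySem

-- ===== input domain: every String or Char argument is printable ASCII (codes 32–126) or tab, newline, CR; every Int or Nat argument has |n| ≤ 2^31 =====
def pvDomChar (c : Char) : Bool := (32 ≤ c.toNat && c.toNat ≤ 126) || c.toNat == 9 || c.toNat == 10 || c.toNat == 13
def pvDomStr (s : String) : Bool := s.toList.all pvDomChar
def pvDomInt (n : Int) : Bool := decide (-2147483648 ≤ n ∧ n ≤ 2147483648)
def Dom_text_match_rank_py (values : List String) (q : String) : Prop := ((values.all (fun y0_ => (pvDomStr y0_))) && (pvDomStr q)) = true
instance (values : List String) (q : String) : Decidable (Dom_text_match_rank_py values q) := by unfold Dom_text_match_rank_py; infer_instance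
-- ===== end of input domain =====

-- B replaces A's three any()-scans over a materialized normalized list with one
-- pass keeping the minimum rank; same return value, no speed claim.
-- ===== PORT A =====
-- _normalized(value): (value or "").casefold().strip()  (casefold = lower on the ASCII domain)
def normalized_py (value : String) : String := PySem.Str.strip (PySem.Str.lower value)

def text_match_rank_py (values : List String) (q : String) : Int :=
  let query := normalized_py q
  if query == "" then 3
  else
    let normalized_values := (values.filter (fun value => !(value == ""))).map (fun value => normalized_py value)
    if normalized_values.any (fun value => value == query) then 0
    else if normalized_values.any (fun value => PySem.Str.startswith value query) then 1
    else if normalized_values.any (fun value => PySem.Str.isIn query value) then 5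
    else 9

-- ===== PORT B =====
def rank_of (query v : String) : Int :=
  if v == query then 0
  else if PySem.Str.startswith v query then 1
  else if PySem.Str.isIn query v then 5
  else 9

def text_match_rank_py_alt (values : List String) (q : String) : Int :=
  let query := normalized_py q
  if query == "" then 3
  else
    values.foldl (fun best value =>
      if value == "" then best
      else
        let r := rank_of query (normalized_py value)
        if r < best then r else best) 9

-- ===== PRECONDITION & SPEC =====
def Spec_text_match_rank_py (values : List String) (q : String) (out : Int) : Prop := out = text_match_rank_py_alt values q
instance (values : List String) (q : String) (out : Int) : Decidable (Spec_text_match_rank_py values q out) := by unfold Spec_text_match_rank_py; infer_instance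

-- ===== CLAIM (what is proved, stated in full; the proofs are below) =====
def Claim_equal_text_match_rank_py : Prop := ∀ (values : List String) (q : String), Dom_text_match_rank_py values q → Spec_text_match_rank_py values q (text_match_rank_py values q)

-- ===== LEMMAS AND PROOFS =====

-- ===== VERDICT (by name: the statement is the Claim_ definition above) =====
-- the value of A's three-scan branch chain on a list of normalized values
def gRank (query : String) (L : List String) : Int :=
  if L.any (fun v => v == query) then 0
  else if L.any (fun v => PySem.Str.startswith v query) then 1
  else if L.any (fun v => PySem.Str.isIn query v) then 5
  else 9

lemma gRank_le_nine (query : String) (L : List String) : gRank query L ≤ 9 := by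
  unfold gRank; split_ifs <;> omega

lemma rank_of_bounds (query v : String) : 0 ≤ rank_of query v ∧ rank_of query v ≤ 9 := by
  unfold rank_of; split_ifs <;> omega

lemma gRank_cons (query n : String) (L : List String) :
    gRank query (n :: L) = min (rank_of query n) (gRank query L) := by
  unfold gRank rank_of
  simp only [List.any_cons]
  rcases Bool.eq_false_or_eq_true (n == query) with h1 | h1 <;>
    rcases Bool.eq_false_or_eq_true (PySem.Str.startswith n query) with h2 | h2 <;>
    rcases Bool.eq_false_or_eq_true (PySem.Str.isIn query n) with h3 | h3 <;>
    rcases Bool.eq_false_or_eq_true (L.any (fun v => v == query)) with h4 | h4 <;>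
    rcases Bool.eq_false_or_eq_true (L.any (fun v => PySem.Str.startswith v query)) with h5 | h5 <;>
    rcases Bool.eq_false_or_eq_true (L.any (fun v => PySem.Str.isIn query v)) with h6 | h6 <;>
    simp only [h1, h2, h3, h4, h5, h6, Bool.true_or, Bool.false_or] <;> norm_num

lemma foldl_min_rank (query : String) (values : List String) (b : Int) (hb : b ≤ 9) :
    values.foldl (fun best value =>
      if value == "" then best
      else
        let r := rank_of query (normalized_py value)
        if r < best then r else best) b
    = min b (gRank query ((values.filter (fun value => !(value == ""))).map (fun value => normalized_py value))) := by
  induction values generalizing b with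
  | nil => simp only [List.foldl_nil, List.filter_nil, List.map_nil]; unfold gRank; simp; omega
  | cons v vs ih =>
    by_cases hv : v = ""
    · subst hv; simpa using ih b hb
    · have hne : (v == "") = false := by simp [hv]
      have hr := rank_of_bounds query (normalized_py v)
      have h1 : (if rank_of query (normalized_py v) < b then rank_of query (normalized_py v) else b)
          = min b (rank_of query (normalized_py v)) := by split_ifs <;> omega
      simp only [List.foldl_cons, List.filter_cons, hne, Bool.not_false, if_true, List.map_cons,
        Bool.false_eq_true, if_false]
      rw [h1, ih _ (by omega), gRank_cons]
      omega

theorem text_match_rank_py_spec : Claim_equal_text_match_rank_py := by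
  intro values q _
  unfold Spec_text_match_rank_py
  simp only [text_match_rank_py, text_match_rank_py_alt]
  by_cases hq : (normalized_py q == "") = true
  · simp [hq]
  · rw [if_neg hq, if_neg hq, foldl_min_rank (normalized_py q) values 9 le_rfl]
    have h9 := gRank_le_nine (normalized_py q) ((values.filter (fun value => !(value == ""))).map (fun value => normalized_py value))
    unfold gRank at *
    split_ifs <;> omega
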